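-- pv_equiv track=rewrite | github.com/rzhang315/FooBar | rainFall.py | findBtwAB
-- ===== SOURCE A (Python) =====
-- def findBtwAB(start, end, heights):
--     if (end == 0) or (end == 1):
--       return 0
--
--     thresh = min (heights[start], heights [end])
--     count = 0
--
--     for x in range(start, end+1):
--       if (thresh-heights[x])>0:
--          count += (thresh-heights[x])
--
--     maxi =  start
--
--     if (maxi == 0):
--        return count
--     maxi0 = heights[0:maxi].index(max(heights[0:maxi]))
--     count += findBtwAB(maxi0, maxi, heights)
--
--     #print "countAb", count
--     return count
-- ===== SOURCE B (Python) =====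
-- def findBtwAB(start, end, heights):
--     if end == 0 or end == 1:
--         return 0
--     # pam[p] = index of the leftmost maximum of heights[:p] (pam[0] unused)
--     pam = [0, 0]
--     best = 0
--     for i in range(1, len(heights)):
--         if heights[i] > heights[best]:
--             best = i
--         pam.append(best)
--     total = 0
--     s, e = start, end
--     while True:
--         thresh = min(heights[s], heights[e])
--         for x in range(s, e + 1):
--             d = thresh - heights[x]
--             if d > 0:
--                 total += d
--         if s <= 1:
--             return total
--         s, e = pam[s], s
-- ===== Notes on version B (the rewrite author's own statement) =====
-- stated objective: faster
-- what changed: B replaces A's recursion, which rescans and copies the prefix heights[0:maxi] with slice/max/index at every level, by one precomputed prefix leftmost-argmax table and a single iterative leftward walk, so each step's argmax is an O(1) lookup; intended as asymptotically faster (a timing run measured 30-254x at n=4096-16384; at larger sizes A timed out, so the top-rung ratio was unconfirmed). …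
-- outside the precondition, e.g. on findBtwAB(-2, 4, [3, 1, 6, 8, 3]): A returns 4, B returns 2
import Mathlib
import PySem

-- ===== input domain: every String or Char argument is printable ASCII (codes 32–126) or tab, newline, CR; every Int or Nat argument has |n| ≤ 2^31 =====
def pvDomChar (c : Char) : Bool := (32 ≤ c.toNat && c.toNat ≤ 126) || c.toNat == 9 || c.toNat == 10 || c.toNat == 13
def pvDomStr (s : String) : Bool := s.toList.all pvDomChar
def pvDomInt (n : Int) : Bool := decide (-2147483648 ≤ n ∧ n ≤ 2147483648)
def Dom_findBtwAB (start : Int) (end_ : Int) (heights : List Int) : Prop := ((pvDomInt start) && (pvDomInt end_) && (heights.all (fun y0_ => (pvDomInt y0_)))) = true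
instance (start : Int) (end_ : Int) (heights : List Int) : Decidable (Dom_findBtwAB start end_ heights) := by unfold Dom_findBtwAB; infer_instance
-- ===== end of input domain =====

-- B replaces A's per-level slice/max/index prefix rescans by one precomputed prefix
-- leftmost-argmax table and an iterative leftward walk (O(1) lookup per step); intended
-- as faster: a timing run measured 30-254x at n=4096-16384 (A timed out above that,
-- leaving the largest rung unconfirmed).

-- ===== PORT A =====
-- literal port of A; heights[i] is PySem.List.pyGetD (exact whenever the index is in
-- range, which Pre_ guarantees); the `none` match arms are Python's ValueError /
-- unreachable-index cases, excluded by Pre_.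
def findBtwAB (start : Int) (end_ : Int) (heights : List Int) : Int :=
  if end_ = 0 ∨ end_ = 1 then 0
  else
    let thresh := min (PySem.List.pyGetD heights start 0) (PySem.List.pyGetD heights end_ 0)
    let count := (PySem.List.pyRange start (end_ + 1) 1).foldl
      (fun c x => if thresh - PySem.List.pyGetD heights x 0 > 0
                  then c + (thresh - PySem.List.pyGetD heights x 0) else c) 0
    let maxi := start
    if maxi = 0 then count
    else
      match hm : PySem.List.max? (PySem.List.slice heights (some 0) (some maxi)) (fun y => y) with
      | none => 0      -- Python: max([]) raises ValueError (outside Pre_)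
      | some mx =>
        match hi : PySem.List.index? (PySem.List.slice heights (some 0) (some maxi)) mx with
        | none => 0    -- unreachable: mx ∈ the slice
        | some maxi0 => count + findBtwAB (maxi0 : Int) maxi heights
termination_by (PySem.List.slice heights (some 0) (some start)).length
decreasing_by
  · obtain ⟨hk, -, -⟩ := PySem.List.getElem_of_index?_eq_some hi
    have hle := PySem.List.clampIdx_le (n := heights.length) (i := start)
    have e0 : PySem.List.clampIdx heights.length (0 : Int) = 0 := by
      simpa using PySem.List.clampIdx_natCast (n := heights.length) (k := 0)
    have hmaxi : maxi = start := rfl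
    simp only [PySem.List.length_slice, PySem.List.clampIdx_natCast, e0, hmaxi] at hk ⊢
    omega

-- ===== PORT B =====
-- B's pam-building loop: state (pam, best), pam grows by one entry per index.
def pvPamFold (heights : List Int) : List Int × Int :=
  (PySem.List.pyRange 1 (heights.length : Int) 1).foldl
    (fun st i =>
      let best := if PySem.List.pyGetD heights i 0 > PySem.List.pyGetD heights st.2 0 then i else st.2
      (st.1 ++ [best], best))
    ([0, 0], 0)

-- B's while loop (the dite guard only establishes termination; it is always taken
-- on the pam table pvPamFold builds)
def findBtwABAltLoop (heights : List Int) (pam : List Int) (s e total : Int) : Int :=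
  let thresh := min (PySem.List.pyGetD heights s 0) (PySem.List.pyGetD heights e 0)
  let total := (PySem.List.pyRange s (e + 1) 1).foldl
    (fun t x => let d := thresh - PySem.List.pyGetD heights x 0
                if d > 0 then t + d else t) total
  if s ≤ 1 then total
  else
    let m := PySem.List.pyGetD pam s 0
    if h : m.toNat < s.toNat then findBtwABAltLoop heights pam m s total else total
termination_by s.toNat
decreasing_by exact h

def findBtwAB_alt (start : Int) (end_ : Int) (heights : List Int) : Int :=
  if end_ = 0 ∨ end_ = 1 then 0
  else findBtwABAltLoop heights (pvPamFold heights).1 start end_ 0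

-- ===== PRECONDITION & SPEC =====
-- Pre_ excludes (a) the inputs on which the Python A raises — an IndexError when start,
-- end or some x between them falls outside [-len, len), and the ValueError of max([])
-- when heights is empty (unless end is 0 or 1, where A returns 0 before touching
-- heights) — and (b) negative start, on which A still returns but its value is an
-- artefact of Python negative-index wraparound: range(start, end+1) walks wrapped
-- negative positions and the recursion then restarts from the slice heights[0:start],
-- while B's walk treats start as a plain left boundary.
def Pre_findBtwAB (start : Int) (end_ : Int) (heights : List Int) : Prop :=
  (end_ = 0 ∨ end_ = 1) ∨
  (heights ≠ [] ∧ 0 ≤ start ∧ start < (heights.length : Int) ∧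
   -(heights.length : Int) ≤ end_ ∧ end_ < (heights.length : Int))
instance (start : Int) (end_ : Int) (heights : List Int) : Decidable (Pre_findBtwAB start end_ heights) := by unfold Pre_findBtwAB; infer_instance

def pvWitness_findBtwAB : Int × Int × List Int := (2, 3, [3, 1, 2, 4])

def Spec_findBtwAB (start : Int) (end_ : Int) (heights : List Int) (out : Int) : Prop := out = findBtwAB_alt start end_ heights
instance (start : Int) (end_ : Int) (heights : List Int) (out : Int) : Decidable (Spec_findBtwAB start end_ heights out) := by unfold Spec_findBtwAB; infer_instance

-- ===== CLAIM (what is proved, stated in full; the proofs are below) =====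
def Claim_equal_findBtwAB : Prop := ∀ (start : Int) (end_ : Int) (heights : List Int), Dom_findBtwAB start end_ heights → Pre_findBtwAB start end_ heights → Spec_findBtwAB start end_ heights (findBtwAB start end_ heights)

-- ===== LEMMAS AND PROOFS =====

-- value of the maximum of a nonempty list (as Python's max computes it)
def pvMval (l : List Int) : Int :=
  match l with
  | [] => 0
  | a :: t => t.foldl max a

-- index of the leftmost maximum of a nonempty list
def pvLam (l : List Int) : Nat := (PySem.List.index? l (pvMval l)).getD 0

theorem pv_max?_eq (l : List Int) (h : l ≠ []) :
    PySem.List.max? l (fun y => y) = some (pvMval l) := by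
  obtain ⟨a, t, rfl⟩ := List.exists_cons_of_ne_nil h
  simpa [pvMval] using PySem.List.max?_id_cons (x := a) (t := t)

theorem pv_mval_mem (l : List Int) (h : l ≠ []) : pvMval l ∈ l :=
  PySem.List.max?_mem (pv_max?_eq l h)

theorem pv_mval_isMax (l : List Int) (h : l ≠ []) : ∀ y ∈ l, y ≤ pvMval l := by
  intro y hy
  exact PySem.List.max?_isMax (pv_max?_eq l h) y hy

theorem pv_index?_eq (l : List Int) (h : l ≠ []) :
    PySem.List.index? l (pvMval l) = some (pvLam l) := by
  have hmem := pv_mval_mem l h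
  have hs : (PySem.List.index? l (pvMval l)).isSome :=
    (PySem.List.index?_isSome_iff l (pvMval l)).mpr hmem
  obtain ⟨k, hk⟩ := Option.isSome_iff_exists.mp hs
  unfold pvLam
  rw [hk]
  rfl

theorem pv_lam_lt (l : List Int) (h : l ≠ []) : pvLam l < l.length := by
  obtain ⟨hk, -, -⟩ := PySem.List.getElem_of_index?_eq_some (pv_index?_eq l h)
  exact hk

theorem pv_lam_getElem (l : List Int) (h : l ≠ []) (hk : pvLam l < l.length) :
    l[pvLam l] = pvMval l := by
  obtain ⟨hk', he, -⟩ := PySem.List.getElem_of_index?_eq_some (pv_index?_eq l h)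
  exact he

theorem pv_mval_snoc (l : List Int) (v : Int) (h : l ≠ []) :
    pvMval (l ++ [v]) = max (pvMval l) v := by
  obtain ⟨a, t, rfl⟩ := List.exists_cons_of_ne_nil h
  simp [pvMval, List.cons_append, List.foldl_append]

theorem pv_lam_snoc (l : List Int) (v : Int) (h : l ≠ []) :
    pvLam (l ++ [v]) = if pvMval l < v then l.length else pvLam l := by
  have hm := pv_mval_snoc l v h
  unfold pvLam
  rw [hm]
  by_cases hc : pvMval l < v
  · rw [if_pos hc, max_eq_right hc.le]
    have hnot : v ∉ l := fun hv => absurd (pv_mval_isMax l h v hv) (by omega)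
    rw [PySem.List.index?_append_singleton_self (l := l) (c := v) hnot]
    rfl
  · rw [if_neg hc, max_eq_left (by omega)]
    rw [PySem.List.index?_append_of_mem (l := l) (t := [v]) (pv_mval_mem l h)]

-- shift the accumulator out of the water-counting fold
theorem pv_foldl_shift (l : List Int) (f : Int → Int) (t : Int) :
    l.foldl (fun c x => if f x > 0 then c + f x else c) t
      = t + l.foldl (fun c x => if f x > 0 then c + f x else c) 0 := by
  induction l generalizing t with
  | nil => simp
  | cons a l ih =>
    simp only [List.foldl_cons]
    rw [ih, ih (if f a > 0 then 0 + f a else 0)]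
    split_ifs <;> ring

-- the pam fold computes the prefix leftmost-argmax table
theorem pv_pamFold_spec (heights : List Int) (hne : heights ≠ []) (j : Nat)
    (h1 : 1 ≤ j) (h2 : j ≤ heights.length) :
    (PySem.List.pyRange 1 (j : Int) 1).foldl
      (fun st i =>
        let best := if PySem.List.pyGetD heights i 0 > PySem.List.pyGetD heights st.2 0 then i else st.2
        (st.1 ++ [best], best))
      ([0, 0], 0)
    = ((0 : Int) :: (List.range j).map (fun q => ((pvLam (heights.take (q + 1)) : Nat) : Int)),
       ((pvLam (heights.take j) : Nat) : Int)) := by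
  have hlam1 : pvLam (heights.take 1) = 0 := by
    obtain ⟨a, t, rfl⟩ := List.exists_cons_of_ne_nil hne
    simp [pvLam, pvMval, PySem.List.index?_cons_self]
  induction j, h1 using Nat.le_induction with
  | base =>
    simp only [Nat.cast_one]
    rw [PySem.List.pyRange_one_eq_nil (le_refl 1)]
    simp [List.range_one, hlam1]
  | succ j hj ih =>
    have hjlen : j < heights.length := by omega
    have htake_len : (heights.take j).length = j := by
      rw [List.length_take]; omega
    have htake_ne : heights.take j ≠ [] := by
      intro hnil; rw [hnil] at htake_len; simp at htake_len; omega
    have hlam_lt : pvLam (heights.take j) < j := by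
      have := pv_lam_lt (heights.take j) htake_ne
      omega
    have hcast : (((j + 1 : Nat)) : Int) = (j : Int) + 1 := by push_cast; ring
    rw [hcast, PySem.List.pyRange_one_succ_right (by exact_mod_cast hj),
        List.foldl_append, ih (by omega)]
    simp only [List.foldl_cons, List.foldl_nil]
    have hg1 : PySem.List.pyGetD heights ((j : Nat) : Int) 0 = heights[j] :=
      PySem.List.pyGetD_ofNat heights j 0 hjlen
    have hg2 : PySem.List.pyGetD heights ((pvLam (heights.take j) : Nat) : Int) 0
        = pvMval (heights.take j) := by
      rw [PySem.List.pyGetD_ofNat heights (pvLam (heights.take j)) 0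
            (by omega : pvLam (heights.take j) < heights.length)]
      have := pv_lam_getElem (heights.take j) htake_ne (by omega)
      rw [← this]
      rw [List.getElem_take]
    have hsnoc : heights.take (j + 1) = heights.take j ++ [heights[j]] := by
      rw [List.take_succ, List.getElem?_eq_getElem hjlen]
      rfl
    have hlam_succ : pvLam (heights.take (j + 1))
        = if pvMval (heights.take j) < heights[j] then j else pvLam (heights.take j) := by
      rw [hsnoc, pv_lam_snoc _ _ htake_ne, htake_len]
    simp [hg1, hg2, hlam_succ, List.range_succ, List.cons_append,
      apply_ite (fun n : Nat => (n : Int))]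

theorem pv_pam_lookup (heights : List Int) (hne : heights ≠ []) (p : Nat)
    (h1 : 1 ≤ p) (h2 : p ≤ heights.length) :
    PySem.List.pyGetD (pvPamFold heights).1 (p : Int) 0 = ((pvLam (heights.take p) : Nat) : Int) := by
  have hlen : 1 ≤ heights.length := le_trans h1 h2
  unfold pvPamFold
  rw [pv_pamFold_spec heights hne heights.length hlen le_rfl]
  rw [PySem.List.pyGetD_natCast]
  obtain ⟨k, rfl⟩ : ∃ k, p = k + 1 := ⟨p - 1, by omega⟩
  have hk : k < heights.length := by omega
  simp [List.getD, List.getElem?_map, List.getElem?_range, hk]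

-- one-step unfolding of port B's loop, with the lets zeta-reduced
theorem altLoop_unfold (heights : List Int) (pam : List Int) (s e total : Int) :
    findBtwABAltLoop heights pam s e total =
      (if s ≤ 1 then
        (PySem.List.pyRange s (e + 1) 1).foldl
          (fun t x => if min (PySem.List.pyGetD heights s 0) (PySem.List.pyGetD heights e 0)
              - PySem.List.pyGetD heights x 0 > 0
            then t + (min (PySem.List.pyGetD heights s 0) (PySem.List.pyGetD heights e 0)
              - PySem.List.pyGetD heights x 0) else t) total
      else if h : (PySem.List.pyGetD pam s 0).toNat < s.toNat then
        findBtwABAltLoop heights pam (PySem.List.pyGetD pam s 0) s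
          ((PySem.List.pyRange s (e + 1) 1).foldl
            (fun t x => if min (PySem.List.pyGetD heights s 0) (PySem.List.pyGetD heights e 0)
                - PySem.List.pyGetD heights x 0 > 0
              then t + (min (PySem.List.pyGetD heights s 0) (PySem.List.pyGetD heights e 0)
                - PySem.List.pyGetD heights x 0) else t) total)
      else
        (PySem.List.pyRange s (e + 1) 1).foldl
          (fun t x => if min (PySem.List.pyGetD heights s 0) (PySem.List.pyGetD heights e 0)
              - PySem.List.pyGetD heights x 0 > 0
            then t + (min (PySem.List.pyGetD heights s 0) (PySem.List.pyGetD heights e 0)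
              - PySem.List.pyGetD heights x 0) else t) total) := by
  rw [findBtwABAltLoop]

-- one-step unfolding of port A, with the lets zeta-reduced
theorem findBtwAB_unfold (start end_ : Int) (heights : List Int) :
    findBtwAB start end_ heights =
      (if end_ = 0 ∨ end_ = 1 then 0
      else if start = 0 then
        (PySem.List.pyRange start (end_ + 1) 1).foldl
          (fun c x => if min (PySem.List.pyGetD heights start 0) (PySem.List.pyGetD heights end_ 0)
              - PySem.List.pyGetD heights x 0 > 0
            then c + (min (PySem.List.pyGetD heights start 0) (PySem.List.pyGetD heights end_ 0)
              - PySem.List.pyGetD heights x 0) else c) 0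
      else
        match hm : PySem.List.max? (PySem.List.slice heights (some 0) (some start)) (fun y => y) with
        | none => 0
        | some mx =>
          match hi : PySem.List.index? (PySem.List.slice heights (some 0) (some start)) mx with
          | none => 0
          | some maxi0 =>
            (PySem.List.pyRange start (end_ + 1) 1).foldl
              (fun c x => if min (PySem.List.pyGetD heights start 0) (PySem.List.pyGetD heights end_ 0)
                  - PySem.List.pyGetD heights x 0 > 0
                then c + (min (PySem.List.pyGetD heights start 0) (PySem.List.pyGetD heights end_ 0)
                  - PySem.List.pyGetD heights x 0) else c) 0
              + findBtwAB (maxi0 : Int) start heights) := by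
  rw [findBtwAB]

theorem pv_loop_eq (heights : List Int) : ∀ (k : Nat) (s e total : Int),
    s.toNat = k →
    0 ≤ s → s < (heights.length : Int) →
    -(heights.length : Int) ≤ e → e < (heights.length : Int) → e ≠ 0 → e ≠ 1 →
    findBtwABAltLoop heights (pvPamFold heights).1 s e total
      = total + findBtwAB s e heights := by
  intro k
  induction k using Nat.strong_induction_on with
  | _ k ih =>
  intro s e total hk hs0 hs2 he1 he2 he0 he3
  have hlenI : 0 < (heights.length : Int) := by omega
  have hlen : 1 ≤ heights.length := by exact_mod_cast hlenI
  have hne : heights ≠ [] := by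
    intro h; rw [h] at hlen; simp at hlen
  have hcond : ¬ (e = 0 ∨ e = 1) := by
    rintro (h | h)
    · exact he0 h
    · exact he3 h
  rw [altLoop_unfold, findBtwAB_unfold s e heights, if_neg hcond]
  rw [pv_foldl_shift (PySem.List.pyRange s (e + 1) 1)
    (fun x => min (PySem.List.pyGetD heights s 0) (PySem.List.pyGetD heights e 0)
      - PySem.List.pyGetD heights x 0) total]
  -- the effective length p of the prefix heights[0:s] (for s ≥ 1)
  by_cases hs00 : s = 0
  · subst hs00
    simp
  · have hs1' : 1 ≤ s := by omega
    set p : Nat := s.toNat with hp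
    have hpI : (p : Int) = s := by omega
    have hp1 : 1 ≤ p := by omega
    have hp2 : p ≤ heights.length := by omega
    have hslice : PySem.List.slice heights (some 0) (some s) = heights.take p := by
      rw [PySem.List.slice_zero_start, ← hpI, PySem.List.slice_to_natCast]
    have htake_len : (heights.take p).length = p := by rw [List.length_take]; omega
    have htne : heights.take p ≠ [] := by
      intro h; rw [h] at htake_len; simp at htake_len; omega
    have hlam_lt : pvLam (heights.take p) < p := by
      have := pv_lam_lt (heights.take p) htne
      omega
    have hlookup : PySem.List.pyGetD (pvPamFold heights).1 ((p : Nat) : Int) 0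
        = ((pvLam (heights.take p) : Nat) : Int) := pv_pam_lookup heights hne p hp1 hp2
    rw [if_neg hs00, hslice]
    by_cases hs11 : s = 1
    · rw [if_pos (by omega : s ≤ 1)]
      -- A's recursion findBtwAB maxi0 1 heights returns 0 (end == 1)
      split
      · rename_i hnone
        rw [pv_max?_eq _ htne] at hnone
        cases hnone
      · rename_i mx hmx
        rw [pv_max?_eq _ htne] at hmx
        injection hmx with hmx'
        split
        · rename_i hnone2
          rw [← hmx', pv_index?_eq _ htne] at hnone2
          cases hnone2
        · rename_i maxi0 hidx
          rw [← hmx', pv_index?_eq _ htne] at hidx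
          injection hidx with hidx'
          have hA0 : findBtwAB ((maxi0 : Nat) : Int) s heights = 0 := by
            rw [findBtwAB_unfold, if_pos (Or.inr hs11)]
          rw [hA0]
          omega
    · rw [if_neg (by omega : ¬ s ≤ 1), ← hpI, hlookup,
        dif_pos (by omega : ((pvLam (heights.take p) : Nat) : Int).toNat < s.toNat)]
      rw [ih (pvLam (heights.take p)) (by omega) ((pvLam (heights.take p) : Nat) : Int) ((p : Nat) : Int) _
          (by omega) (by omega) (by omega) (by omega) (by omega) (by omega) (by omega)]
      split
      · rename_i hnone
        rw [pv_max?_eq _ htne] at hnone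
        cases hnone
      · rename_i mx hmx
        rw [pv_max?_eq _ htne] at hmx
        injection hmx with hmx'
        split
        · rename_i hnone2
          rw [← hmx', pv_index?_eq _ htne] at hnone2
          cases hnone2
        · rename_i maxi0 hidx
          rw [← hmx', pv_index?_eq _ htne] at hidx
          injection hidx with hidx'
          rw [← hidx']
          omega

-- ===== VERDICT (by name: the statement is the Claim_ definition above) =====
theorem findBtwAB_spec : Claim_equal_findBtwAB := by
  intro start end_ heights _ hpre
  unfold Spec_findBtwAB
  rcases hpre with h01 | ⟨hne, hs0, hs2, he1, he2⟩
  · rw [findBtwAB, findBtwAB_alt]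
    simp [h01]
  · by_cases h01 : end_ = 0 ∨ end_ = 1
    · rw [findBtwAB, findBtwAB_alt]; simp [h01]
    · push_neg at h01
      rw [findBtwAB_alt]
      rw [if_neg (by push_neg; exact h01)]
      rw [pv_loop_eq heights _ start end_ 0 rfl hs0 hs2 he1 he2 h01.1 h01.2]
      ring
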